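-- pv_equiv track=rewrite | github.com/square-dot/animated-umbrella | p272.py | process
-- ===== SOURCE A (Python) =====
-- def process(line):
--     i = 0
--
--     newstring = ""
--
--     for char in line:
--         if char == "\"":
--             if i%2 == 0:
--                 newstring = newstring + "``"
--             else:
--                 newstring = newstring + "''"
--             i += 1
--         else:
--             newstring = newstring + char
--
--     return newstring
-- ===== SOURCE B (Python) =====
-- def process(line):
--     parts = line.split('"')
--     pieces = [parts[0]]
--     for j, part in enumerate(parts[1:]):
--         pieces.append('``' if j % 2 == 0 else "''")
--         pieces.append(part)
--     return ''.join(pieces)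
-- ===== Notes on version B (the rewrite author's own statement) =====
-- stated objective: faster
-- what changed: B replaces A's per-character scan with a quote counter and repeated string concatenation by one split on the double-quote character and a join of the segments with alternating TeX-style open/close quote separators chosen by segment index.
import Mathlib
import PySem

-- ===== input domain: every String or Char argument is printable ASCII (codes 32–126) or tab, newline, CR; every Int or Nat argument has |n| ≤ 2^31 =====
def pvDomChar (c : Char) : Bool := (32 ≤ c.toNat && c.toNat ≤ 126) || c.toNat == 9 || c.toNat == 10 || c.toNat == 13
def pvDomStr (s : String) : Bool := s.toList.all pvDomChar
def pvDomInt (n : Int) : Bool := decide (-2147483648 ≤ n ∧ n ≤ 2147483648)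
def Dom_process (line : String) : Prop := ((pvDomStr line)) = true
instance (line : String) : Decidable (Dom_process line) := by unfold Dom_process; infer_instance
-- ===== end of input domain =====

-- B replaces A's per-character scan (conditional accumulator with a quote counter) by one split on '"'
-- and a join with alternating ``/'' separators chosen by segment index (objective: idiomatic).

-- ===== PORT A =====
-- A's loop: state (i, newstring); on '"' append `` or '' by parity of i and bump i, else append the char.
def process (line : String) : String :=
  let st := line.toList.foldl
    (fun (st : Nat × List Char) char =>
      if char = '"' then
        (st.1 + 1, st.2 ++ (if st.1 % 2 = 0 then ['`', '`'] else ['\'', '\'']))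
      else
        (st.1, st.2 ++ [char]))
    (0, [])
  String.ofList st.2

-- ===== PORT B =====
-- Source B: parts = line.split('"'); pieces = [parts[0]]; for j, part in enumerate(parts[1:]):
--   append the alternating quote then part; return ''.join(pieces).
-- line.split('"') is ported as List.splitOn '"'; enumerate as List.zipIdx (pair order (part, j)).
def process_alt (line : String) : String :=
  let parts := line.toList.splitOn '"'
  let pieces := ((parts.drop 1).zipIdx).foldl
    (fun (acc : List (List Char)) jp =>
      acc ++ [(if jp.2 % 2 = 0 then ['`', '`'] else ['\'', '\''])] ++ [jp.1])
    [parts.headD []]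
  String.ofList pieces.flatten

-- ===== PRECONDITION & SPEC =====
def Spec_process (line : String) (out : String) : Prop := out = process_alt line
instance (line : String) (out : String) : Decidable (Spec_process line out) := by unfold Spec_process; infer_instance

-- ===== CLAIM (what is proved, stated in full; the proofs are below) =====
def Claim_equal_process : Prop := ∀ (line : String), Dom_process line → Spec_process line (process line)

-- ===== LEMMAS AND PROOFS =====

-- recursive reading of A's loop output (proof-only helper)
def procA (i : Nat) : List Char → List Char
  | [] => []
  | c :: cs =>
    if c = '"' then
      (if i % 2 = 0 then ['`', '`'] else ['\'', '\'']) ++ procA (i + 1) cs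
    else
      c :: procA i cs

-- the alternating join of the separator-delimited tail segments (proof-only helper)
def altJoin (i : Nat) : List (List Char) → List Char
  | [] => []
  | p :: ps => (if i % 2 = 0 then ['`', '`'] else ['\'', '\'']) ++ p ++ altJoin (i + 1) ps

theorem foldA_eq (l : List Char) : ∀ (i : Nat) (acc : List Char),
    (l.foldl (fun (st : Nat × List Char) char =>
      if char = '"' then
        (st.1 + 1, st.2 ++ (if st.1 % 2 = 0 then ['`', '`'] else ['\'', '\'']))
      else
        (st.1, st.2 ++ [char])) (i, acc)).2 = acc ++ procA i l := by
  induction l with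
  | nil => intro i acc; simp [procA]
  | cons c cs ih =>
    intro i acc
    by_cases hc : c = '"' <;> simp [procA, hc, ih]

theorem procA_split (l : List Char) : ∀ (i : Nat),
    procA i l = (l.splitOn '"').headD [] ++ altJoin i ((l.splitOn '"').drop 1) := by
  induction l with
  | nil => intro i; simp [procA, List.splitOn, List.splitOnP_nil, altJoin]
  | cons c cs ih =>
    intro i
    by_cases hc : c = '"'
    · have h1 : (c :: cs).splitOn '"' = [] :: cs.splitOn '"' := by
        simp [List.splitOn, List.splitOnP_cons, hc]
      obtain ⟨q, qs, hq⟩ : ∃ q qs, cs.splitOn '"' = q :: qs := by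
        cases h : cs.splitOn '"' with
        | nil => exact absurd h (List.splitOnP_ne_nil _ _)
        | cons q qs => exact ⟨q, qs, rfl⟩
      subst hc
      rw [h1]
      simp [procA, hq, altJoin, ih]
    · have h1 : (c :: cs).splitOn '"' = (cs.splitOn '"').modifyHead (List.cons c) := by
        simp [List.splitOn, List.splitOnP_cons, hc]
      obtain ⟨q, qs, hq⟩ : ∃ q qs, cs.splitOn '"' = q :: qs := by
        cases h : cs.splitOn '"' with
        | nil => exact absurd h (List.splitOnP_ne_nil _ _)
        | cons q qs => exact ⟨q, qs, rfl⟩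
      rw [h1]
      simp [procA, hc, hq, ih]

theorem foldB_eq (ps : List (List Char)) : ∀ (j : Nat) (acc : List (List Char)),
    ((ps.zipIdx j).foldl
      (fun (acc : List (List Char)) jp =>
        acc ++ [(if jp.2 % 2 = 0 then ['`', '`'] else ['\'', '\''])] ++ [jp.1]) acc).flatten
    = acc.flatten ++ altJoin j ps := by
  induction ps with
  | nil => intro j acc; simp [altJoin]
  | cons p ps ih =>
    intro j acc
    rw [List.zipIdx_cons, List.foldl_cons, ih]
    simp [altJoin]

-- ===== VERDICT (by name: the statement is the Claim_ definition above) =====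
theorem process_spec : Claim_equal_process := by
  intro line _
  unfold Spec_process process process_alt
  simp only [foldA_eq, foldB_eq, List.nil_append]
  rw [procA_split]
  simp
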